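-- pv_equiv track=rewrite | github.com/AlexanderZvyagin/dto-code-generator | cg/csharp.py | csharp_type_to_string
-- ===== SOURCE A (Python) =====
-- def csharp_type_to_string (name:str):
--
--     if name[-2:]=='[]':
--         t = csharp_type_to_string(name[:-2])
--         return f'List<{t}>'
--
--     return {
--         'void'    : 'void',
--         'string'  : 'string',
--         'int'     : 'int',
--         'float'   : 'float',
--     }.get(name,name)
-- ===== SOURCE B (Python) =====
-- def csharp_type_to_string(name: str):
--     depth = 0
--     while name.endswith('[]'):
--         name = name[:-2]
--         depth += 1
--     t = {
--         'void'   : 'void',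
--         'string' : 'string',
--         'int'    : 'int',
--         'float'  : 'float',
--     }.get(name, name)
--     for _ in range(depth):
--         t = f'List<{t}>'
--     return t
-- ===== Notes on version B (the rewrite author's own statement) =====
-- stated objective: simpler
-- what changed: Replaces the recursion with a flat loop: strip trailing bracket pairs while counting the nesting depth, look the base name up once in the table, then wrap the result in the generic-list form depth times.
import Mathlib
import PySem

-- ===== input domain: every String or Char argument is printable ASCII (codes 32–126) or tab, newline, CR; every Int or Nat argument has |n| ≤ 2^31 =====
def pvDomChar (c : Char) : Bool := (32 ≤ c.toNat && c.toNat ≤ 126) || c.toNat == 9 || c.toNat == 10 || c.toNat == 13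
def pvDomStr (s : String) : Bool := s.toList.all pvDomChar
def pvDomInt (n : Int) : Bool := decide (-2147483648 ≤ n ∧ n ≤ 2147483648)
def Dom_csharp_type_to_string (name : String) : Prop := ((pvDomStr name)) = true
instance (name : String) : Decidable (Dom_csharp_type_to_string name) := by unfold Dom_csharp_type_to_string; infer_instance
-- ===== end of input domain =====

-- B replaces A's recursion by a flat strip-count loop plus a wrap loop (objective: simpler).

-- the 4-entry type-name dict shared by both Pythons
def csharpTypeTable : PySem.Dict (List Char) (List Char) :=
  PySem.Dict.ofList
    [ ("void".toList,   "void".toList),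
      ("string".toList, "string".toList),
      ("int".toList,    "int".toList),
      ("float".toList,  "float".toList) ]

-- ===== PORT A =====
-- A, step for step on the code points: name[-2:] == '[]' test, recurse on name[:-2], wrap; else dict .get(name, name)
def csharpTypeToStringA (cs : List Char) : List Char :=
  if PySem.List.slice cs (some (-2)) none = ['[', ']'] then
    let t := csharpTypeToStringA (PySem.List.slice cs none (some (-2)))
    "List<".toList ++ t ++ ">".toList
  else
    PySem.Dict.getD csharpTypeTable cs cs
termination_by cs.length
decreasing_by
  rename_i h
  rw [PySem.List.slice_from_neg_ofNat cs 2 (by omega)] at h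
  have hlen : cs.length - 2 + 2 = cs.length := by
    have := congrArg List.length h
    simp at this
    omega
  rw [PySem.List.slice_to_neg_ofNat cs 2 (by omega)]
  simp
  omega

def csharp_type_to_string (name : String) : String :=
  String.ofList (csharpTypeToStringA name.toList)

-- ===== PORT B =====
-- B's while loop: strip trailing '[]' pairs, counting how many were removed
def stripBrackets (cs : List Char) : List Char × Nat :=
  if PySem.Chars.endswith cs "[]".toList then
    let p := stripBrackets (PySem.List.slice cs none (some (-2)))
    (p.1, p.2 + 1)
  else (cs, 0)
termination_by cs.length
decreasing_by
  rename_i h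
  rw [PySem.Chars.endswith_iff] at h
  have h2 : 2 ≤ cs.length := by
    have := List.IsSuffix.length_le h
    simpa using this
  rw [PySem.List.slice_to_neg_ofNat cs 2 (by omega)]
  simp
  omega

def csharp_type_to_string_alt (name : String) : String :=
  let p := stripBrackets name.toList
  let t := PySem.Dict.getD csharpTypeTable p.1 p.1
  String.ofList ((List.range p.2).foldl (fun t _ => "List<".toList ++ t ++ ">".toList) t)

-- ===== PRECONDITION & SPEC =====
def Spec_csharp_type_to_string (name : String) (out : String) : Prop := out = csharp_type_to_string_alt name
instance (name : String) (out : String) : Decidable (Spec_csharp_type_to_string name out) := by unfold Spec_csharp_type_to_string; infer_instance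

-- ===== CLAIM (what is proved, stated in full; the proofs are below) =====
def Claim_equal_csharp_type_to_string : Prop := ∀ (name : String), Dom_csharp_type_to_string name → Spec_csharp_type_to_string name (csharp_type_to_string name)

-- ===== LEMMAS AND PROOFS =====

-- A's suffix test and B's endswith test agree
lemma cond_iff (cs : List Char) :
    (PySem.List.slice cs (some (-2)) none = ['[', ']']) ↔ PySem.Chars.endswith cs "[]".toList = true := by
  have hT : "[]".toList = ['[', ']'] := rfl
  rw [PySem.Chars.endswith_iff, hT, PySem.List.slice_from_neg_ofNat cs 2 (by omega)]
  constructor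
  · intro h
    exact ⟨List.take (cs.length - 2) cs, by rw [← h]; exact List.take_append_drop _ _⟩
  · intro h
    have h2 : 2 ≤ cs.length := by
      have := List.IsSuffix.length_le h
      simpa using this
    obtain ⟨pre, hpre⟩ := h
    have hl : pre.length = cs.length - 2 := by
      have := congrArg List.length hpre
      simp at this
      omega
    rw [← hpre, show (pre ++ ['[', ']']).length - 2 = pre.length by simp, List.drop_left]

lemma main_lemma : ∀ (n : ℕ) (cs : List Char), cs.length ≤ n →
    csharpTypeToStringA cs =
      (List.range (stripBrackets cs).2).foldl (fun t _ => "List<".toList ++ t ++ ">".toList)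
        (PySem.Dict.getD csharpTypeTable (stripBrackets cs).1 (stripBrackets cs).1) := by
  intro n
  induction n with
  | zero =>
    intro cs hcs
    have hnil : cs = [] := List.eq_nil_of_length_eq_zero (Nat.le_zero.mp hcs)
    subst hnil
    have h : ¬ (PySem.List.slice ([] : List Char) (some (-2)) none = ['[', ']']) := by
      rw [PySem.List.slice_from_neg_ofNat ([] : List Char) 2 (by omega)]
      simp
    have he : ¬ PySem.Chars.endswith ([] : List Char) "[]".toList = true :=
      fun hc => h ((cond_iff []).mpr hc)
    rw [csharpTypeToStringA, stripBrackets, if_neg h, if_neg (by exact he)]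
    simp
  | succ n ih =>
    intro cs hcs
    rw [csharpTypeToStringA, stripBrackets]
    by_cases h : PySem.List.slice cs (some (-2)) none = ['[', ']']
    · have he : PySem.Chars.endswith cs "[]".toList = true := (cond_iff cs).mp h
      rw [if_pos h, if_pos he]
      have hlt : (PySem.List.slice cs none (some (-2))).length ≤ n := by
        rw [PySem.Chars.endswith_iff] at he
        have h2 : 2 ≤ cs.length := by
          have := List.IsSuffix.length_le he
          simpa using this
        rw [PySem.List.slice_to_neg_ofNat cs 2 (by omega)]
        simp
        omega
      rw [ih _ hlt]
      simp [List.range_succ]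
    · have he : ¬ PySem.Chars.endswith cs "[]".toList = true := fun hc => h ((cond_iff cs).mpr hc)
      rw [if_neg h, if_neg he]
      simp

-- ===== VERDICT (by name: the statement is the Claim_ definition above) =====
theorem csharp_type_to_string_spec : Claim_equal_csharp_type_to_string := by
  intro name _
  unfold Spec_csharp_type_to_string csharp_type_to_string csharp_type_to_string_alt
  rw [main_lemma name.toList.length name.toList le_rfl]
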